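-- pv_equiv track=rewrite | github.com/BghBenja/CodeWars | Python/kyu7kata/simple_fun_#154:zero_and_one.py | mine_zero_and_one
-- ===== SOURCE A (Python) =====
-- def mine_zero_and_one(s):
--     for i in range(len(s)-1):
--         if s[i:i+2] == "01" or s[i:i+2] == "10":
--             if s[i:i+2] == "01":
--                 s = s.replace("01", "  ", 1)
--             else:
--                 s = s.replace("10", "  ", 1)
--     return len(s) - s.count(" ")
-- ===== SOURCE B (Python) =====
-- def mine_zero_and_one(s):
--     removed = 0
--     prev = None
--     for c in s:
--         if prev is not None and prev != c and prev in "01" and c in "01":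
--             removed += 2
--             prev = None
--         else:
--             prev = c
--     return len(s) - removed - s.count(" ")
-- ===== Notes on version B (the rewrite author's own statement) =====
-- stated objective: faster
-- what changed: Replaces the quadratic scan loop (which re-scans the whole string with str.replace on every hit) by a single left-to-right pass that keeps only the previous unblanked character and a removed-pair counter.
import Mathlib
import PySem

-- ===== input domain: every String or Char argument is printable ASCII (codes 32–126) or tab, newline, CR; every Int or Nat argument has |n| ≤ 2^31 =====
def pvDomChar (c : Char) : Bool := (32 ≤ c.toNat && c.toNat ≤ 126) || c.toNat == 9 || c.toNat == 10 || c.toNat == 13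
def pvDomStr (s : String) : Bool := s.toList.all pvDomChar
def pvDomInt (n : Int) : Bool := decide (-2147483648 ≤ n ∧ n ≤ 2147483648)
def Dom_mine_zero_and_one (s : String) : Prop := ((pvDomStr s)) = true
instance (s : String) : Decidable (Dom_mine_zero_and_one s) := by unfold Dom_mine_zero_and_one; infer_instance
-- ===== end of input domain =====

-- B replaces A's quadratic scan-and-replace loop by a single linear pass that tracks the
-- previous unblanked character and a removed-pair counter; same return value, proved below.

-- ===== PORT A =====
-- hand port of Python's s.replace(old, new, 1) for nonempty old: replace the leftmost
-- occurrence of old (exact step-for-step leftmost scan; string unchanged if old is absent)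
def pvRepl1 (old new : List Char) : List Char → List Char
  | [] => []
  | c :: rest =>
      if old.isPrefixOf (c :: rest) then new ++ (c :: rest).drop old.length
      else c :: pvRepl1 old new rest

-- the body of A's for-loop (the s[i:i+2] checks and the two one-shot replaces)
def pvStepA (t : List Char) (i : Nat) : List Char :=
  if PySem.List.slice t (some (i : Int)) (some ((i : Int) + 2)) = ['0', '1'] then
    pvRepl1 ['0', '1'] [' ', ' '] t
  else if PySem.List.slice t (some (i : Int)) (some ((i : Int) + 2)) = ['1', '0'] then
    pvRepl1 ['1', '0'] [' ', ' '] t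
  else t

def mine_zero_and_one (s : String) : Int :=
  let t := (List.range (s.toList.length - 1)).foldl pvStepA s.toList
  (PySem.Chars.len t : Int) - (PySem.Chars.count t [' '] : Int)

-- ===== PORT B =====
-- the body of B's for-loop: state (prev, removed)
def pvStepB (st : Option Char × Int) (c : Char) : Option Char × Int :=
  match st with
  | (some p, r) =>
      if p ≠ c ∧ (p = '0' ∨ p = '1') ∧ (c = '0' ∨ c = '1') then (none, r + 2)
      else (some c, r)
  | (none, r) => (some c, r)

def mine_zero_and_one_alt (s : String) : Int :=
  let st := s.toList.foldl pvStepB (none, 0)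
  (PySem.Str.len s : Int) - st.2 - (PySem.Str.count s " " : Int)

-- ===== PRECONDITION & SPEC =====
def Spec_mine_zero_and_one (s : String) (out : Int) : Prop := out = mine_zero_and_one_alt s
instance (s : String) (out : Int) : Decidable (Spec_mine_zero_and_one s out) := by unfold Spec_mine_zero_and_one; infer_instance

-- ===== CLAIM (what is proved, stated in full; the proofs are below) =====
def Claim_equal_mine_zero_and_one : Prop := ∀ (s : String), Dom_mine_zero_and_one s → Spec_mine_zero_and_one s (mine_zero_and_one s)

-- ===== LEMMAS AND PROOFS =====

-- canonical number of characters removed by the left-to-right pair cancellation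
def pvPairB (a b : Char) : Bool := (a == '0' && b == '1') || (a == '1' && b == '0')

def pvCancel : List Char → Nat
  | [] => 0
  | [_] => 0
  | a :: b :: rest => if pvPairB a b then 2 + pvCancel rest else pvCancel (b :: rest)

lemma pvPairB_iff (a b : Char) :
    pvPairB a b = true ↔ (a ≠ b ∧ (a = '0' ∨ a = '1') ∧ (b = '0' ∨ b = '1')) := by
  constructor
  · intro h
    simp only [pvPairB, Bool.or_eq_true, Bool.and_eq_true, beq_iff_eq] at h
    rcases h with ⟨rfl, rfl⟩ | ⟨rfl, rfl⟩ <;> exact ⟨by decide, by simp, by simp⟩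
  · rintro ⟨hne, rfl | rfl, rfl | rfl⟩ <;> first | exact absurd rfl hne | decide

lemma pvCancel_cons_of_nopair (c : Char) (h0 : c ≠ '0') (h1 : c ≠ '1') (l : List Char) :
    pvCancel (c :: l) = pvCancel l := by
  cases l with
  | nil => rfl
  | cons x r =>
    simp only [pvCancel]
    rw [if_neg]
    intro h
    rcases (pvPairB_iff c x).1 h with ⟨_, h0' | h1', _⟩ <;> contradiction

lemma pvCancel_short (l : List Char) (h : l.length ≤ 1) : pvCancel l = 0 := by
  match l, h with
  | [], _ => rfl
  | [_], _ => rfl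

lemma pvCountGo_singleton (c : Char) : ∀ (l : List Char) (fuel acc : Nat), l.length ≤ fuel →
    PySem.Chars.count.go [c] fuel l acc = acc + l.count c := by
  intro l
  induction l with
  | nil => intro fuel acc _; cases fuel <;> simp [PySem.Chars.count.go]
  | cons h t ih =>
    intro fuel acc hf
    cases fuel with
    | zero => simp at hf
    | succ f =>
      have hf' : t.length ≤ f := by simpa using hf
      by_cases hc : c = h
      · subst hc
        simp [PySem.Chars.count.go, List.isPrefixOf, ih _ _ hf', List.count_cons]
        omega
      · simp [PySem.Chars.count.go, List.isPrefixOf, hc, ih _ _ hf', Ne.symm hc]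

lemma pvCount_singleton (l : List Char) (c : Char) : PySem.Chars.count l [c] = l.count c := by
  simpa using pvCountGo_singleton c l l.length 0 le_rfl

-- B's fold computes pvCancel
lemma pvFoldB (l : List Char) : ∀ (st : Option Char) (r : Int),
    (l.foldl pvStepB (st, r)).2 =
      r + (pvCancel (match st with | none => l | some a => a :: l) : Int) := by
  induction l with
  | nil =>
    intro st r
    cases st <;> simp [pvCancel]
  | cons c t ih =>
    intro st r
    cases st with
    | none =>
      simp only [List.foldl_cons, pvStepB]
      exact ih (some c) r
    | some p =>
      simp only [List.foldl_cons, pvStepB]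
      by_cases h : p ≠ c ∧ (p = '0' ∨ p = '1') ∧ (c = '0' ∨ c = '1')
      · rw [if_pos h, ih none (r + 2)]
        have hp : pvPairB p c = true := (pvPairB_iff p c).2 h
        simp only [pvCancel, hp, if_pos]
        push_cast; ring
      · rw [if_neg h, ih (some c) r]
        have hp : pvPairB p c = false := by
          by_contra hb
          exact h ((pvPairB_iff p c).1 (by simpa using hb))
        simp [pvCancel, hp]

-- leftmost replace hits exactly position i when no earlier occurrence exists
lemma pvRepl1_at (old new : List Char) (hne : old ≠ []) :
    ∀ (i : Nat) (t : List Char), old <+: t.drop i → (∀ j, j < i → ¬ old <+: t.drop j) →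
    pvRepl1 old new t = t.take i ++ new ++ t.drop (i + old.length) := by
  intro i
  induction i with
  | zero =>
    intro t hp _
    cases t with
    | nil =>
      exfalso; exact hne (List.prefix_nil.1 (by simpa using hp))
    | cons c rest =>
      simp only [List.drop_zero] at hp
      simp [pvRepl1, List.isPrefixOf_iff_prefix.2 hp]
  | succ i ih =>
    intro t hp hnone
    cases t with
    | nil =>
      exfalso; exact hne (List.prefix_nil.1 (by simpa using hp))
    | cons c rest =>
      have h0 : ¬ old.isPrefixOf (c :: rest) = true := by
        rw [List.isPrefixOf_iff_prefix]
        simpa using hnone 0 (Nat.succ_pos i)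
      rw [pvRepl1, if_neg h0]
      rw [ih rest (by simpa using hp) (fun j hj => by simpa using hnone (j + 1) (by omega))]
      simp [List.take_succ_cons, List.drop_succ_cons, Nat.add_right_comm]

lemma pvTake2_prefix (l pat : List Char) (hp : pat.length = 2) :
    l.take 2 = pat ↔ pat <+: l := by
  rw [List.prefix_iff_eq_take, hp, eq_comm]

-- "no 01/10 pair starts before position i"
def pvNoPairBelow (t : List Char) (i : Nat) : Prop :=
  ∀ j, j < i → (t.drop j).take 2 ≠ ['0', '1'] ∧ (t.drop j).take 2 ≠ ['1', '0']

lemma pvSlice2 (t : List Char) (i : Nat) :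
    PySem.List.slice t (some (i : Int)) (some ((i : Int) + 2)) = (t.drop i).take 2 := by
  have := PySem.List.slice_natCast_add t i 2
  simpa using this

lemma pvTake2_eq_cons (t : List Char) (i : Nat) (a b : Char)
    (h : (t.drop i).take 2 = [a, b]) : t.drop i = a :: b :: t.drop (i + 2) := by
  obtain ⟨suf, hsuf⟩ := (pvTake2_prefix (t.drop i) [a, b] rfl).1 h
  have hs : suf = t.drop (i + 2) := by
    have := congrArg (List.drop 2) hsuf
    simpa [List.drop_drop] using this
  rw [← hsuf, hs]
  rfl

-- blanking positions i, i+1 keeps "no pair below" up to i+1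
lemma pvBlankNoPair (t : List Char) (i : Nat) (hi : i ≤ t.length)
    (h : pvNoPairBelow t i) :
    pvNoPairBelow (t.take i ++ [' ', ' '] ++ t.drop (i + 2)) (i + 1) := by
  intro j hj
  have hlen : (t.take i).length = i := by rw [List.length_take]; omega
  have hdrop : (t.take i ++ [' ', ' '] ++ t.drop (i + 2)).drop j
      = (t.take i).drop j ++ ([' ', ' '] ++ t.drop (i + 2)) := by
    rw [List.append_assoc, List.drop_append_of_le_length (by omega)]
  have hul : ((t.take i).drop j).length = i - j := by rw [List.length_drop]; omega
  have hu' : (t.take i).drop j = (t.drop j).take (i - j) := List.drop_take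
  rw [hdrop]
  rcases hcases : (t.take i).drop j with _ | ⟨c, _ | ⟨d, v⟩⟩
  · constructor <;> simp
  · constructor <;> simp
  · have hij : 2 ≤ i - j := by rw [hcases] at hul; simp at hul; omega
    have h2 : (t.drop j).take 2 = [c, d] := by
      have : (t.drop j).take 2 = ((t.drop j).take (i - j)).take 2 := by
        rw [List.take_take, min_eq_left (by omega)]
      rw [this, ← hu', hcases]
      rfl
    have hh := h j (by omega)
    have htake : ((c :: d :: v) ++ ([' ', ' '] ++ t.drop (i + 2))).take 2 = [c, d] := rfl
    rw [htake]
    exact ⟨h2 ▸ hh.1, h2 ▸ hh.2⟩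

-- main invariant of A's loop over the remaining index interval
lemma pvLoopA_main : ∀ (k i : Nat) (t : List Char), pvNoPairBelow t i →
    ((List.range' i k).foldl pvStepA t).length = t.length ∧
    ((List.range' i k).foldl pvStepA t).count ' ' = t.count ' ' + pvCancel ((t.drop i).take (k + 1)) := by
  intro k
  induction k with
  | zero =>
    intro i t _
    refine ⟨rfl, ?_⟩
    rw [pvCancel_short _ (List.length_take_le 1 _)]
    simp
  | succ k ih =>
    intro i t h
    rw [List.range'_succ, List.foldl_cons]
    by_cases hc1 : (t.drop i).take 2 = ['0', '1']
    · -- A blanks "01" at position i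
      have hsplit := pvTake2_eq_cons t i '0' '1' hc1
      have hlen2 : i + 2 ≤ t.length := by
        have := congrArg List.length hsplit
        simp only [List.length_drop, List.length_cons] at this
        omega
      have hstep : pvStepA t i = t.take i ++ [' ', ' '] ++ t.drop (i + 2) := by
        unfold pvStepA
        rw [pvSlice2, if_pos hc1]
        exact pvRepl1_at ['0', '1'] [' ', ' '] (by decide) i t
          ((pvTake2_prefix _ _ rfl).1 hc1)
          (fun j hj hpre => (h j hj).1 ((pvTake2_prefix _ _ rfl).2 hpre))
      have hlen' : (pvStepA t i).length = t.length := by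
        rw [hstep]; simp [List.length_take, List.length_drop]; omega
      have hcnt' : (pvStepA t i).count ' ' = t.count ' ' + 2 := by
        rw [hstep]
        conv_rhs => rw [← List.take_append_drop i t, hsplit]
        simp [List.count_append, List.count_cons]
        omega
      have hnp' : pvNoPairBelow (pvStepA t i) (i + 1) := by
        rw [hstep]; exact pvBlankNoPair t i (by omega) h
      have hdrop' : (pvStepA t i).drop (i + 1) = ' ' :: t.drop (i + 2) := by
        rw [hstep, List.append_assoc, List.drop_append, List.length_take,
          min_eq_left (by omega), List.drop_of_length_le (by rw [List.length_take]; omega)]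
        have h1 : i + 1 - i = 1 := by omega
        rw [h1]
        rfl
      obtain ⟨ihl, ihc⟩ := ih (i + 1) (pvStepA t i) hnp'
      refine ⟨ihl.trans hlen', ?_⟩
      rw [ihc, hcnt', hdrop', hsplit]
      have hp01 : pvPairB '0' '1' = true := rfl
      simp only [List.take_succ_cons, pvCancel, hp01, if_true,
        pvCancel_cons_of_nopair ' ' (by decide) (by decide)]
      omega
    · by_cases hc2 : (t.drop i).take 2 = ['1', '0']
      · -- A blanks "10" at position i
        have hsplit := pvTake2_eq_cons t i '1' '0' hc2
        have hlen2 : i + 2 ≤ t.length := by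
          have := congrArg List.length hsplit
          simp only [List.length_drop, List.length_cons] at this
          omega
        have hstep : pvStepA t i = t.take i ++ [' ', ' '] ++ t.drop (i + 2) := by
          unfold pvStepA
          rw [pvSlice2, if_neg hc1, if_pos hc2]
          exact pvRepl1_at ['1', '0'] [' ', ' '] (by decide) i t
            ((pvTake2_prefix _ _ rfl).1 hc2)
            (fun j hj hpre => (h j hj).2 ((pvTake2_prefix _ _ rfl).2 hpre))
        have hlen' : (pvStepA t i).length = t.length := by
          rw [hstep]; simp [List.length_take, List.length_drop]; omega
        have hcnt' : (pvStepA t i).count ' ' = t.count ' ' + 2 := by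
          rw [hstep]
          conv_rhs => rw [← List.take_append_drop i t, hsplit]
          simp [List.count_append, List.count_cons]
          omega
        have hnp' : pvNoPairBelow (pvStepA t i) (i + 1) := by
          rw [hstep]; exact pvBlankNoPair t i (by omega) h
        have hdrop' : (pvStepA t i).drop (i + 1) = ' ' :: t.drop (i + 2) := by
          rw [hstep, List.append_assoc, List.drop_append, List.length_take,
            min_eq_left (by omega), List.drop_of_length_le (by rw [List.length_take]; omega)]
          have h1 : i + 1 - i = 1 := by omega
          rw [h1]
          rfl
        obtain ⟨ihl, ihc⟩ := ih (i + 1) (pvStepA t i) hnp'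
        refine ⟨ihl.trans hlen', ?_⟩
        rw [ihc, hcnt', hdrop', hsplit]
        have hp10 : pvPairB '1' '0' = true := rfl
        simp only [List.take_succ_cons, pvCancel, hp10, if_true,
          pvCancel_cons_of_nopair ' ' (by decide) (by decide)]
        omega
      · -- no pair starts at i
        have hstep : pvStepA t i = t := by
          unfold pvStepA
          rw [pvSlice2, if_neg hc1, if_neg hc2]
        have hnp' : pvNoPairBelow t (i + 1) := by
          intro j hj
          rcases Nat.lt_or_ge j i with hji | hji
          · exact h j hji
          · have : j = i := by omega
            subst this
            exact ⟨hc1, hc2⟩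
        obtain ⟨ihl, ihc⟩ := ih (i + 1) t hnp'
        rw [hstep]
        refine ⟨ihl, ?_⟩
        rw [ihc]
        have hdd : t.drop (i + 1) = (t.drop i).drop 1 := by rw [List.drop_drop]
        rcases hdi : t.drop i with _ | ⟨a, _ | ⟨b, r⟩⟩
        · rw [hdd, hdi]
          simp [pvCancel]
        · rw [hdd, hdi]
          rw [pvCancel_short _ (by simp), pvCancel_short _ (by simp)]
        · have hab : pvPairB a b = false := by
            by_contra hb
            have hb' : pvPairB a b = true := by simpa using hb
            have : (t.drop i).take 2 = [a, b] := by rw [hdi]; rfl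
            simp only [pvPairB, Bool.or_eq_true, Bool.and_eq_true, beq_iff_eq] at hb'
            rcases hb' with ⟨rfl, rfl⟩ | ⟨rfl, rfl⟩
            · exact hc1 this
            · exact hc2 this
          rw [hdd, hdi]
          simp only [List.take_succ_cons, List.drop_succ_cons, List.drop_zero, pvCancel, hab,
            if_false]
          rfl

-- ===== VERDICT (by name: the statement is the Claim_ definition above) =====
theorem mine_zero_and_one_spec : Claim_equal_mine_zero_and_one := by
  intro s _
  unfold Spec_mine_zero_and_one mine_zero_and_one mine_zero_and_one_alt
  obtain ⟨hl, hc⟩ := pvLoopA_main (s.toList.length - 1) 0 s.toList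
    (fun j hj => absurd hj (Nat.not_lt_zero j))
  have htake : (s.toList.drop 0).take (s.toList.length - 1 + 1) = s.toList := by
    rw [List.drop_zero]
    exact List.take_of_length_le (by omega)
  rw [htake] at hc
  have hb := pvFoldB s.toList none 0
  simp only [] at hb
  have hsp : (" " : String).toList = [' '] := rfl
  simp only [List.range_eq_range', PySem.Chars.len_eq, PySem.Str.len_eq, PySem.Str.count_eq,
    hsp, pvCount_singleton, hl, hc, hb]
  push_cast
  ring
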